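-- pv_equiv track=rewrite | github.com/moodydev/load_balancer | service/scheduler.py | get_devices_per_worker
-- ===== SOURCE A (Python) =====
-- import math
-- from typing import List, Set, Tuple
--
-- def get_devices_per_worker(worker_count: int, devices_count: int) -> List[int]:
--     """Calculates how many devices can be assigned per worker
--
--     Return example: 3 workers, 8 devices: [3, 3, 2]
--     """
--     devices_per_worker = []
--
--     while worker_count:
--         try:
--             per_worker = math.ceil(devices_count/worker_count)
--         except ZeroDivisionError:
--             per_worker = 0
--         devices_per_worker.append(per_worker)
--         devices_count -= per_worker
--         worker_count -= 1
--     return devices_per_worker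
-- ===== SOURCE B (Python) =====
-- def get_devices_per_worker(worker_count: int, devices_count: int):
--     """Calculates how many devices can be assigned per worker"""
--     if worker_count == 0:
--         return []
--     q, r = divmod(devices_count, worker_count)
--     return [q + 1] * r + [q] * (worker_count - r)
-- ===== Notes on version B (the rewrite author's own statement) =====
-- stated objective: simpler
-- what changed: Replaces the per-worker ceil-and-subtract while loop with a single divmod and direct list construction [q+1]*r + [q]*(w-r).
import Mathlib
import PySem

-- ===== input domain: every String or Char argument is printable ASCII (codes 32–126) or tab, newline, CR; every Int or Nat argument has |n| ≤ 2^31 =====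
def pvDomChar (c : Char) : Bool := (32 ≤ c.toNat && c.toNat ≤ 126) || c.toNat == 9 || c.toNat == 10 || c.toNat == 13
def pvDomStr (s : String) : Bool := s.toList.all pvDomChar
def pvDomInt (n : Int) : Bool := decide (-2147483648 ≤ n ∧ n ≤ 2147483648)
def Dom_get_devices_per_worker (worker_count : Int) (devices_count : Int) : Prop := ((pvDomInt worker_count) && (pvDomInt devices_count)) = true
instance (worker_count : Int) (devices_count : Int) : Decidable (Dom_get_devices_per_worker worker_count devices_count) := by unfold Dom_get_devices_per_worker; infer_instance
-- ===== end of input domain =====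

-- B replaces the per-worker ceil-and-subtract loop with one divmod and direct list construction (objective: simpler).

-- ===== PORT A =====
-- math.ceil(devices_count/worker_count): exact integer ceiling division; on the |n| ≤ 2^31 domain
-- the float quotient never rounds across an integer, so math.ceil(d/w) equals this exact ceiling.
def pvCeilA (d w : Int) : Int := -(PySem.Int.floordiv (-d) w)

-- the while loop, counting worker_count down; faithful for worker_count ≥ 0 (Pre_).
-- (the 'except ZeroDivisionError' branch is dead: the loop body runs only with worker_count ≠ 0)
def pvLoopA : Nat → Int → List Int
  | 0, _ => []
  | n + 1, d =>
      let per_worker := pvCeilA d ((n : Int) + 1)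
      per_worker :: pvLoopA n (d - per_worker)

def get_devices_per_worker (worker_count : Int) (devices_count : Int) : List Int :=
  pvLoopA worker_count.toNat devices_count

-- ===== PORT B =====
def get_devices_per_worker_alt (worker_count : Int) (devices_count : Int) : List Int :=
  if worker_count = 0 then []
  else
    let q := PySem.Int.floordiv devices_count worker_count
    let r := PySem.Int.mod devices_count worker_count
    List.replicate r.toNat (q + 1) ++ List.replicate (worker_count - r).toNat q

-- ===== PRECONDITION & SPEC =====
-- Pre_ excludes negative worker_count, on which A's while loop never terminates (it returns no value there).
def Pre_get_devices_per_worker (worker_count : Int) (devices_count : Int) : Prop := 0 ≤ worker_count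
instance (worker_count : Int) (devices_count : Int) : Decidable (Pre_get_devices_per_worker worker_count devices_count) := by unfold Pre_get_devices_per_worker; infer_instance
def pvWitness_get_devices_per_worker : Int × Int := (3, 8)

def Spec_get_devices_per_worker (worker_count : Int) (devices_count : Int) (out : List Int) : Prop := out = get_devices_per_worker_alt worker_count devices_count
instance (worker_count : Int) (devices_count : Int) (out : List Int) : Decidable (Spec_get_devices_per_worker worker_count devices_count out) := by unfold Spec_get_devices_per_worker; infer_instance

-- ===== CLAIM (what is proved, stated in full; the proofs are below) =====
def Claim_equal_get_devices_per_worker : Prop := ∀ (worker_count : Int) (devices_count : Int), Dom_get_devices_per_worker worker_count devices_count → Pre_get_devices_per_worker worker_count devices_count → Spec_get_devices_per_worker worker_count devices_count (get_devices_per_worker worker_count devices_count)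

-- ===== LEMMAS AND PROOFS =====

-- the ceiling step in terms of Euclidean quotient/remainder (divisor positive)
lemma pvCeilA_eq (d w : Int) (hw : 0 < w) :
    pvCeilA d w = d / w + (if d % w = 0 then 0 else 1) := by
  have hd := Int.mul_ediv_add_emod d w
  have hr0 : 0 ≤ d % w := Int.emod_nonneg d (by omega)
  have hrw : d % w < w := Int.emod_lt_of_pos d hw
  unfold pvCeilA
  rcases eq_or_ne (d % w) 0 with h | h
  · rw [if_pos h, PySem.Int.neg_floordiv_neg_eq_iff_of_pos hw]
    constructor <;> nlinarith [hd, h]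
  · have hr1 : 0 < d % w := lt_of_le_of_ne hr0 (Ne.symm h)
    rw [if_neg h, PySem.Int.neg_floordiv_neg_eq_iff_of_pos hw]
    constructor <;> nlinarith [hd, hr1, hrw]

-- loop characterisation: with n+1 workers left, the loop yields B's closed form
lemma pvLoopA_eq (n : Nat) : ∀ d : Int,
    pvLoopA (n + 1) d =
      List.replicate (d % ((n : Int) + 1)).toNat (d / ((n : Int) + 1) + 1) ++
      List.replicate (((n : Int) + 1) - d % ((n : Int) + 1)).toNat (d / ((n : Int) + 1)) := by
  induction n with
  | zero =>
      intro d
      simp [pvLoopA, pvCeilA_eq d 1 (by omega)]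
  | succ n ih =>
      intro d
      set w : Int := (n : Int) + 1 + 1 with hw
      have hwpos : (0 : Int) < w := by omega
      have hd := Int.mul_ediv_add_emod d w
      have hr0 : 0 ≤ d % w := Int.emod_nonneg d (by omega)
      have hrw : d % w < w := Int.emod_lt_of_pos d hwpos
      show pvLoopA (n + 1 + 1) d = _
      rw [pvLoopA]
      simp only [Nat.cast_add, Nat.cast_one]
      rw [pvCeilA_eq d w hwpos]
      rcases eq_or_ne (d % w) 0 with h | h
      · -- remainder 0: everyone gets q
        rw [if_pos h]
        have hnext : d - (d / w + 0) = ((n : Int) + 1) * (d / w) := by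
          linear_combination -hd + h - (d / w) * hw
        rw [hnext, ih]
        have h1 : (((n : Int) + 1) * (d / w)) / ((n : Int) + 1) = d / w :=
          Int.mul_ediv_cancel_left _ (by omega)
        have h2 : (((n : Int) + 1) * (d / w)) % ((n : Int) + 1) = 0 := Int.mul_emod_right _ _
        rw [h1, h2, h]
        simp only [Int.toNat_zero, List.replicate_zero, List.nil_append, Int.sub_zero]
        have : (w.toNat) = ((n : Int) + 1).toNat + 1 := by omega
        rw [this, List.replicate_succ, ← hw]
        norm_num
      · -- remainder r > 0: first worker gets q+1, remainder drops by one
        rw [if_neg h]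
        have hnext : d - (d / w + 1) = ((n : Int) + 1) * (d / w) + (d % w - 1) := by
          linear_combination -hd - (d / w) * hw
        rw [hnext, ih]
        have h1 : (((n : Int) + 1) * (d / w) + (d % w - 1)) / ((n : Int) + 1) = d / w := by
          rw [add_comm, Int.add_mul_ediv_left _ _ (show ((n : Int) + 1) ≠ 0 by omega),
              Int.ediv_eq_zero_of_lt (by omega) (by omega)]
          omega
        have h2 : (((n : Int) + 1) * (d / w) + (d % w - 1)) % ((n : Int) + 1) = d % w - 1 := by
          rw [add_comm, Int.add_mul_emod_self_left, Int.emod_eq_of_lt (by omega) (by omega)]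
        rw [h1, h2]
        have hrt : (d % w).toNat = (d % w - 1).toNat + 1 := by omega
        have hst : (((n : Int) + 1) - (d % w - 1)).toNat = (w - d % w).toNat := by omega
        rw [hrt, hst, List.replicate_succ, ← hw]
        simp

-- ===== VERDICT (by name: the statement is the Claim_ definition above) =====
theorem get_devices_per_worker_spec : Claim_equal_get_devices_per_worker := by
  intro w d _ hpre
  unfold Spec_get_devices_per_worker get_devices_per_worker get_devices_per_worker_alt
  have hpre' : (0 : Int) ≤ w := hpre
  rcases eq_or_ne w 0 with rfl | hne
  · simp [pvLoopA]
  · rw [if_neg hne]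
    have hwpos : (0 : Int) < w := by omega
    obtain ⟨n, hn⟩ : ∃ n : Nat, w.toNat = n + 1 := ⟨w.toNat - 1, by omega⟩
    have hcast : (n : Int) + 1 = w := by omega
    rw [hn, pvLoopA_eq, hcast,
        PySem.Int.floordiv_eq_ediv_of_pos hwpos, PySem.Int.mod_eq_emod_of_pos hwpos]
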